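-- pv_equiv track=rewrite | github.com/xlmohan/python | dsa/BigOnotation_5forloops.py | five_for_loops
-- ===== SOURCE A (Python) =====
-- def five_for_loops(n):
--     count = 0
--     for i in range(n):          # O(n)
--         for j in range(n):      # O(n)
--             for k in range(n):  # O(n)
--                 for l in range(n):  # O(n)
--                     for m in range(n):  # O(n)
--                         count += 1      # O(1)
--     return count                # Overall: O(n^5)
-- ===== SOURCE B (Python) =====
-- def five_for_loops(n):
--     return max(n, 0) ** 5
-- ===== Notes on version B (the rewrite author's own statement) =====
-- stated objective: faster
-- what changed: Replaced the five nested counting loops by the closed form max(n,0)**5.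
import Mathlib
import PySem

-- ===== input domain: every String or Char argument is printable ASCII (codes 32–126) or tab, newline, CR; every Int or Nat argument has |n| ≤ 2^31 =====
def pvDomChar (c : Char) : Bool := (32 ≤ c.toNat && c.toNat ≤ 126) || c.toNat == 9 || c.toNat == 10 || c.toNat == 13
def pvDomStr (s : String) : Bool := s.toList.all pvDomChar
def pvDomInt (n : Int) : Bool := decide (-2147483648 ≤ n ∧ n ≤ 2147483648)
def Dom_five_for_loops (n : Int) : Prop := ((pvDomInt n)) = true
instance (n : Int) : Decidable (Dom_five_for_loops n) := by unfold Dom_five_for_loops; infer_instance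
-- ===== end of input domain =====

-- B replaces the five nested counting loops by the closed form max(n,0)^5 (O(1) instead of O(n^5)).

-- ===== PORT A =====
def five_for_loops (n : Int) : Int :=
  (PySem.List.pyRange 0 n 1).foldl (fun count _i =>
    (PySem.List.pyRange 0 n 1).foldl (fun count _j =>
      (PySem.List.pyRange 0 n 1).foldl (fun count _k =>
        (PySem.List.pyRange 0 n 1).foldl (fun count _l =>
          (PySem.List.pyRange 0 n 1).foldl (fun count _m =>
            count + 1) count) count) count) count) 0

-- ===== PORT B =====
def five_for_loops_alt (n : Int) : Int := (max n 0) ^ 5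

-- ===== PRECONDITION & SPEC =====
def Spec_five_for_loops (n : Int) (out : Int) : Prop := out = five_for_loops_alt n
instance (n : Int) (out : Int) : Decidable (Spec_five_for_loops n out) := by unfold Spec_five_for_loops; infer_instance

-- ===== CLAIM (what is proved, stated in full; the proofs are below) =====
def Claim_equal_five_for_loops : Prop := ∀ (n : Int), Dom_five_for_loops n → Spec_five_for_loops n (five_for_loops n)

-- ===== LEMMAS AND PROOFS =====

-- a fold whose step always adds the constant d adds length * d in total
theorem pv_foldl_add_const {α : Type} (d : Int) (g : Int → α → Int)
    (h : ∀ c x, g c x = c + d) : ∀ (l : List α) (c : Int), l.foldl g c = c + l.length * d := by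
  intro l
  induction l with
  | nil => intro c; simp
  | cons a t ih => intro c; simp [List.foldl, h, ih, add_mul]; ring

theorem five_for_loops_eq_pow (n : Int) :
    five_for_loops n = ((PySem.List.pyRange 0 n 1).length : Int) ^ 5 := by
  unfold five_for_loops
  set L := PySem.List.pyRange 0 n 1 with hL
  set len : Int := (L.length : Int) with hlen
  rw [pv_foldl_add_const (len ^ 4) _ (fun c x => by
    rw [pv_foldl_add_const (len ^ 3) _ (fun c x => by
      rw [pv_foldl_add_const (len ^ 2) _ (fun c x => by
        rw [pv_foldl_add_const len _ (fun c x => by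
          rw [pv_foldl_add_const 1 _ (fun c x => rfl)]
          simp [← hlen]) ]
        ring_nf
        rw [sq]) ]
      ring) ]
    ring) ]
  ring

-- ===== VERDICT (by name: the statement is the Claim_ definition above) =====
theorem five_for_loops_spec : Claim_equal_five_for_loops := by
  intro n _
  unfold Spec_five_for_loops five_for_loops_alt
  rw [five_for_loops_eq_pow, PySem.List.length_pyRange_one]
  have : ((n - 0).toNat : Int) = max n 0 := by
    rw [Int.toNat_eq_max]; ring_nf
  rw [this]
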